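-- pv_equiv track=rewrite | github.com/bahadir-bakla/musicmath | scripts/brute_force_patterns.py | p82_kural_90
-- ===== SOURCE A (Python) =====
-- def p82_kural_90(n, width=20):
--     """Wolfram Kural 90 (Sierpinski üçgeni)
--     Armoni: XOR tabanlı fraktal → geometrik ritim"""
--     state = [0] * width
--     state[width // 2] = 1
--     for _ in range(n):
--         yield sum(state)
--         new_state = [
--             state[(i - 1) % width] ^ state[(i + 1) % width]
--             for i in range(width)
--         ]
--         state = new_state
-- ===== SOURCE B (Python) =====
-- def p82_kural_90(n, width=20):
--     """Wolfram Kural 90 (Sierpinski üçgeni)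
--     Armoni: XOR tabanlı fraktal → geometrik ritim"""
--     mask = (1 << width) - 1
--     state = 1 << (width // 2)
--     for _ in range(n):
--         yield state.bit_count()
--         state = (((state << 1) | (state >> (width - 1)))
--                  ^ ((state >> 1) | (state << (width - 1)))) & mask
-- ===== Notes on version B (the rewrite author's own statement) =====
-- stated objective: faster
-- what changed: B replaces A's per-cell Python list comprehension by a single width-bit integer: each Rule-90 step is two circular bit-rotations XORed together under a mask, and the yielded population count is state.bit_count() instead of sum(list).
import Mathlib
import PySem

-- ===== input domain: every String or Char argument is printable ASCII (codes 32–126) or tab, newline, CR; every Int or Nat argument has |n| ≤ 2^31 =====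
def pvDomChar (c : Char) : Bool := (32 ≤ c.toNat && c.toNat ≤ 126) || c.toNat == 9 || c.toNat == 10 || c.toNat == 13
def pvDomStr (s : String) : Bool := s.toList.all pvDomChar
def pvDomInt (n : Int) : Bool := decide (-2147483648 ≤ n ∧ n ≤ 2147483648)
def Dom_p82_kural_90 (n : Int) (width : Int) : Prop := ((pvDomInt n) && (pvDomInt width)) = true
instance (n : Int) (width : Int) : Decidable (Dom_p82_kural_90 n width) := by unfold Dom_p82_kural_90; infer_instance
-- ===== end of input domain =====

-- B replaces A's per-cell list comprehension by a single width-bit integer evolved with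
-- bitwise rotations and popcount (measurably faster by a constant, word-parallel factor).
-- Both Pythons are generators; equivalence is about the list of yielded values.

-- ===== PORT A =====
-- one Rule-90 update: new_state = [state[(i-1)%width] ^ state[(i+1)%width] for i in range(width)]
def pvStepA (state : List Int) (width : Int) : List Int :=
  (PySem.List.pyRange 0 width 1).map (fun i =>
    PySem.Int.bxor (PySem.List.pyGetD state (PySem.Int.mod (i - 1) width) 0)
                   (PySem.List.pyGetD state (PySem.Int.mod (i + 1) width) 0))

-- the 'for _ in range(n)' loop, collecting the yields
def pvLoopA : Nat → List Int → Int → List Int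
  | 0, _, _ => []
  | k + 1, state, width => state.sum :: pvLoopA k (pvStepA state width) width

def p82_kural_90 (n : Int) (width : Int) : List Int :=
  let state := (List.replicate width.toNat (0 : Int)).set (PySem.Int.floordiv width 2).toNat 1
  pvLoopA n.toNat state width

-- ===== PORT B =====
-- one update: (((s<<1)|(s>>(width-1))) ^ ((s>>1)|(s<<(width-1)))) & mask
def pvStepB (state : Int) (width : Int) : Int :=
  PySem.Int.band
    (PySem.Int.bxor (PySem.Int.bor (state <<< (1 : Nat)) (state >>> (width - 1).toNat))
                    (PySem.Int.bor (state >>> (1 : Nat)) (state <<< (width - 1).toNat)))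
    ((1 <<< width.toNat) - 1)

def pvLoopB : Nat → Int → Int → List Int
  | 0, _, _ => []
  | k + 1, state, width => (PySem.Int.bitCount state : Int) :: pvLoopB k (pvStepB state width) width

def p82_kural_90_alt (n : Int) (width : Int) : List Int :=
  pvLoopB n.toNat ((1 : Int) <<< (PySem.Int.floordiv width 2).toNat) width

-- ===== PRECONDITION & SPEC =====
-- A raises IndexError (state[width//2] on a list of length max(width,0)) whenever width < 1.
def Pre_p82_kural_90 (n : Int) (width : Int) : Prop := 1 ≤ width
instance (n : Int) (width : Int) : Decidable (Pre_p82_kural_90 n width) := by unfold Pre_p82_kural_90; infer_instance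
def pvWitness_p82_kural_90 : Int × Int := (3, 5)

def Spec_p82_kural_90 (n : Int) (width : Int) (out : List Int) : Prop := out = p82_kural_90_alt n width
instance (n : Int) (width : Int) (out : List Int) : Decidable (Spec_p82_kural_90 n width out) := by unfold Spec_p82_kural_90; infer_instance

-- ===== CLAIM (what is proved, stated in full; the proofs are below) =====
def Claim_equal_p82_kural_90 : Prop := ∀ (n : Int) (width : Int), Dom_p82_kural_90 n width → Pre_p82_kural_90 n width → Spec_p82_kural_90 n width (p82_kural_90 n width)

-- ===== LEMMAS AND PROOFS =====

-- the bit view of a width-bit nat as A's cell list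
def pvBits (b W : Nat) : List Int :=
  (List.range W).map (fun i => if b.testBit i then (1 : Int) else 0)

-- one Rule-90 update on the nat representation (pvStepB, seen on Nat)
def pvNatStep (b W : Nat) : Nat :=
  (((b <<< 1) ||| (b >>> (W - 1))) ^^^ ((b >>> 1) ||| (b <<< (W - 1)))) &&& (2 ^ W - 1)

theorem pvBits_init (W : Nat) (_hW : 1 ≤ W) :
    (List.replicate W (0 : Int)).set (W / 2) 1 = pvBits (1 <<< (W / 2)) W := by
  apply List.ext_getElem
  · simp [pvBits]
  · intro i h1 h2
    have hi : i < W := by simpa using h1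
    simp only [pvBits, List.getElem_set, List.getElem_replicate, List.getElem_map,
      List.getElem_range, Nat.shiftLeft_eq, one_mul]
    by_cases h : i = W / 2
    · simp [h, Nat.testBit_two_pow_self]
    · have h' : ¬ W / 2 = i := fun e => h e.symm
      simp [h', Nat.testBit_two_pow_of_ne h']

theorem pvBits_sum (b W : Nat) (hb : b < 2 ^ W) :
    (pvBits b W).sum = (PySem.Int.bitCount (b : Int) : Int) := by
  induction W generalizing b with
  | zero =>
    interval_cases b
    simp [pvBits, PySem.Int.bitCount_zero]
  | succ W ih =>
    rcases Nat.eq_zero_or_pos b with hb0 | hb0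
    · subst hb0
      simp [pvBits, PySem.Int.bitCount_zero, Nat.zero_testBit]
    · have hrec : PySem.Int.bitCount (b : Int) = b % 2 + PySem.Int.bitCount ((b / 2 : Nat) : Int) :=
        PySem.Int.bitCount_natCast hb0
      have hlist : pvBits b (W + 1)
          = (if b.testBit 0 then (1 : Int) else 0) :: pvBits (b / 2) W := by
        simp only [pvBits, List.range_succ_eq_map, List.map_cons, List.map_map]
        congr 1
        apply List.map_congr_left
        intro k _
        simp [Function.comp, Nat.testBit_succ]
      have hdiv : b / 2 < 2 ^ W := by
        have := hb
        rw [pow_succ] at this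
        omega
      rw [hlist, List.sum_cons, ih _ hdiv, hrec]
      rcases Nat.mod_two_eq_zero_or_one b with h2 | h2 <;>
        simp [Nat.testBit_zero, h2]

theorem pvNatStep_lt (b W : Nat) : pvNatStep b W < 2 ^ W := by
  unfold pvNatStep
  have h2 : (0:Nat) < 2 ^ W := Nat.two_pow_pos W
  calc _ ≤ 2 ^ W - 1 := Nat.and_le_right
  _ < 2 ^ W := by omega

-- bit k of the rotated-XOR update is the Rule-90 neighbour XOR
theorem pvNatStep_testBit (b W k : Nat) (hW : 1 ≤ W) (hb : b < 2 ^ W) (hk : k < W) :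
    (pvNatStep b W).testBit k
      = ((b.testBit ((k + W - 1) % W)).xor (b.testBit ((k + 1) % W))) := by
  have hhigh : ∀ m, W ≤ m → b.testBit m = false := fun m hm =>
    Nat.testBit_eq_false_of_lt (lt_of_lt_of_le hb (Nat.pow_le_pow_right (by omega) hm))
  unfold pvNatStep
  simp only [Nat.testBit_and, Nat.testBit_xor, Nat.testBit_or, Nat.testBit_shiftLeft,
    Nat.testBit_shiftRight, Nat.testBit_two_pow_sub_one, hk, decide_true, Bool.and_true]
  by_cases h0 : k = 0
  · subst h0
    have hL : ((0 + W - 1) % W) = W - 1 := by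
      rw [Nat.mod_eq_of_lt (by omega)]
      omega
    by_cases h1 : W = 1
    · subst h1
      simp [hL, hhigh 1 (by omega)]
    · have hR : ((0 + 1) % W) = 1 := Nat.mod_eq_of_lt (by omega)
      have hng : ¬ (W - 1 ≤ 0) := by omega
      simp [hR, hng]
  · have hk1 : 1 ≤ k := by omega
    have hL : ((k + W - 1) % W) = k - 1 := by
      have : k + W - 1 = (k - 1) + W := by omega
      rw [this, Nat.add_mod_right, Nat.mod_eq_of_lt (by omega)]
    have hfalse1 : b.testBit (W - 1 + k) = false := hhigh _ (by omega)
    by_cases hkW : k = W - 1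
    · have hR : ((k + 1) % W) = 0 := by
        rw [show k + 1 = W by omega, Nat.mod_self]
      have hge : W - 1 ≤ k := by omega
      simp [hL, hR, hfalse1, hk1, hge, show k - (W - 1) = 0 by omega,
        hhigh (1 + k) (by omega)]
    · have hR : ((k + 1) % W) = k + 1 := Nat.mod_eq_of_lt (by omega)
      have hnge : ¬ (W - 1 ≤ k) := by omega
      have hc : 1 + k = k + 1 := by omega
      simp [hL, hR, hfalse1, hk1, hnge, hc]

theorem pvStepB_natCast (b W : Nat) (hW : 1 ≤ W) :
    pvStepB (b : Int) (W : Int) = ((pvNatStep b W : Nat) : Int) := by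
  unfold pvStepB pvNatStep
  have h1 : ((W : Int) - 1).toNat = W - 1 := by omega
  have h2 : ((W : Int)).toNat = W := by omega
  rw [h1, h2, show (1 : Int) = ((1 : Nat) : Int) by norm_num]
  have hsl : ∀ (m : Nat) (k : Nat), ((m : Int) <<< k) = ((m <<< k : Nat) : Int) := by
    intro m k
    simp [Int.shiftLeft_eq, Nat.shiftLeft_eq]
  have hsr : ∀ (m : Nat) (k : Nat), ((m : Int) >>> k) = ((m >>> k : Nat) : Int) := by
    intro m k
    simp [Int.shiftRight_eq]
  simp only [hsl, hsr, PySem.Int.bor_natCast, PySem.Int.bxor_natCast]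
  have hm : ((1 <<< W : Nat) : Int) - ((1 : Nat) : Int) = ((2 ^ W - 1 : Nat) : Int) := by
    rw [Nat.shiftLeft_eq, one_mul]
    push_cast [Nat.one_le_two_pow]
    ring
  rw [hm, PySem.Int.band_natCast]

theorem pvStep_comm (b W : Nat) (hW : 1 ≤ W) (hb : b < 2 ^ W) :
    pvStepA (pvBits b W) (W : Int) = pvBits (pvStepB (b : Int) (W : Int)).toNat W ∧
      (pvStepB (b : Int) (W : Int)).toNat < 2 ^ W ∧
      pvStepB (b : Int) (W : Int) = ((pvStepB (b : Int) (W : Int)).toNat : Int) := by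
  rw [pvStepB_natCast b W hW, Int.toNat_natCast]
  refine ⟨?_, pvNatStep_lt b W, rfl⟩
  unfold pvStepA
  rw [PySem.List.pyRange_zero_natCast, List.map_map]
  conv_rhs => unfold pvBits
  apply List.map_congr_left
  intro k hk
  have hkW : k < W := List.mem_range.mp hk
  have hWpos : (0 : Int) < (W : Int) := by exact_mod_cast hW
  have hlen : (pvBits b W).length = W := by simp [pvBits]
  -- the two neighbour indices, as naturals
  have hmodL : PySem.Int.mod ((k : Int) - 1) (W : Int) = (((k + W - 1) % W : Nat) : Int) := by
    rw [PySem.Int.mod_eq_emod_of_pos hWpos]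
    have h1 : ((k : Int) - 1 + (W : Int) * 1) % (W : Int) = ((k : Int) - 1) % (W : Int) :=
      Int.add_mul_emod_self_left _ _ _
    rw [← h1, show ((k : Int) - 1 + (W : Int) * 1) = (((k + W - 1 : Nat)) : Int) by
      push_cast [hkW.le]; omega]
    simp
  have hmodR : PySem.Int.mod ((k : Int) + 1) (W : Int) = (((k + 1) % W : Nat) : Int) := by
    rw [PySem.Int.mod_eq_emod_of_pos hWpos,
      show ((k : Int) + 1) = (((k + 1 : Nat)) : Int) by push_cast; ring]
    simp
  have hget : ∀ (j : Nat), j < W →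
      PySem.List.pyGetD (pvBits b W) ((j : Nat) : Int) 0 = if b.testBit j then (1:Int) else 0 := by
    intro j hj
    rw [PySem.List.pyGetD_natCast]
    simp [pvBits, List.getD_eq_getElem?_getD, hj]
  simp only [Function.comp]
  rw [hmodL, hmodR, hget _ (Nat.mod_lt _ (by omega)), hget _ (Nat.mod_lt _ (by omega)),
    pvNatStep_testBit b W k hW hb hkW]
  rcases Bool.dichotomy (b.testBit ((k + W - 1) % W)) with hA | hA <;>
    rcases Bool.dichotomy (b.testBit ((k + 1) % W)) with hB | hB <;>
      simp [hA, hB] <;> decide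

theorem pvLoop_eq (k : Nat) (b W : Nat) (hW : 1 ≤ W) (hb : b < 2 ^ W) :
    pvLoopA k (pvBits b W) (W : Int) = pvLoopB k (b : Int) (W : Int) := by
  induction k generalizing b with
  | zero => rfl
  | succ k ih =>
    obtain ⟨h1, h2, h3⟩ := pvStep_comm b W hW hb
    simp only [pvLoopA, pvLoopB, List.cons.injEq]
    refine ⟨pvBits_sum b W hb, ?_⟩
    rw [h1, h3]
    exact ih _ h2

-- ===== VERDICT (by name: the statement is the Claim_ definition above) =====
theorem p82_kural_90_spec : Claim_equal_p82_kural_90 := by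
  intro n width _ hpre
  have h1w : (1 : Int) ≤ width := hpre
  unfold Spec_p82_kural_90 p82_kural_90 p82_kural_90_alt
  have hw : width = ((width.toNat : Nat) : Int) := by omega
  have hW : 1 ≤ width.toNat := by omega
  rw [hw]
  have hfd : PySem.Int.floordiv ((width.toNat : Nat) : Int) 2 = ((width.toNat / 2 : Nat) : Int) := by
    exact_mod_cast PySem.Int.floordiv_natCast width.toNat 2
  rw [hfd]
  have hcast : ((1 : Int) <<< (width.toNat / 2)) = (((1 <<< (width.toNat / 2) : Nat) : Int)) := by
    simp
  simp only [Int.toNat_natCast]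
  rw [pvBits_init width.toNat hW, hcast]
  refine pvLoop_eq n.toNat _ width.toNat hW ?_
  calc 1 <<< (width.toNat / 2) = 2 ^ (width.toNat / 2) := by rw [Nat.shiftLeft_eq]; ring
  _ < 2 ^ width.toNat := Nat.pow_lt_pow_right (by omega) (by omega)
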